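-- pv_equiv track=rewrite | github.com/nathanwisla/GeoprocessingTools | PythonScripts/PopulateCensus.py | GetCrits
-- ===== SOURCE A (Python) =====
-- def GetCrits(inDict):
--
--     masterList = []
--     indices = []
--     loc = 0
--     for key in inDict:
--         fieldVar = inDict[key]['VARS']
--         if fieldVar != None:
--             if len(fieldVar) > 1:
--                 indices.append(loc)
--             loc += len(fieldVar)
--
--             for item in fieldVar:
--                 masterList.append(item)
--
--     indices.append(loc)
--
--     return masterList, indices
-- ===== SOURCE B (Python) =====
-- def GetCrits(inDict):
--     lists = [d['VARS'] for d in inDict.values() if d['VARS'] != None]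
--     masterList = [x for l in lists for x in l]
--     offsets = [0]
--     for l in lists:
--         offsets.append(offsets[-1] + len(l))
--     indices = [off for off, l in zip(offsets, lists) if len(l) > 1]
--     indices.append(offsets[-1])
--     return masterList, indices
-- ===== Notes on version B (the rewrite author's own statement) =====
-- stated objective: alternative
-- what changed: A's single interleaved loop carrying (masterList, indices, running offset) is split into separate passes: collect the non-None VARS lists, flatten them, build a prefix-offset table, and select indices by zipping the offset table with the lists.
import Mathlib
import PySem

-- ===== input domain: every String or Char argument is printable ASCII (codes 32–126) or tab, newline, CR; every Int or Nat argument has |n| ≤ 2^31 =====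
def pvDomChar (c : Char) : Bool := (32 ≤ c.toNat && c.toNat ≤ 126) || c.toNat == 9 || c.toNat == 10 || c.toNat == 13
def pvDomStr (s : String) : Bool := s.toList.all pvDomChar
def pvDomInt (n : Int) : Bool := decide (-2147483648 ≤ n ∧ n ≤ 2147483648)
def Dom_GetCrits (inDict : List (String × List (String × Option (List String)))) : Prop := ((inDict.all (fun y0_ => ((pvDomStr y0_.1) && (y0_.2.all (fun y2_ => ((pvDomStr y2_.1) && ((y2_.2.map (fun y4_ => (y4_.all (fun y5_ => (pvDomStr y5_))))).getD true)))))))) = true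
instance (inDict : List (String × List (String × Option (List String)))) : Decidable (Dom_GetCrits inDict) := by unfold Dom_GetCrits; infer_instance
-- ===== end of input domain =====

-- B replaces A's single interleaved loop (running offset + conditional append) by a flatten pass
-- plus a separate prefix-offset table zipped with the lists (objective: alternative decomposition).

-- ===== PORT A =====
-- one interleaved loop over the dict keys, state (masterList, indices, loc)
def GetCrits (inDict : List (String × List (String × Option (List String)))) : List String × List Int :=
  let d := PySem.Dict.ofList inDict
  let st := d.keys.foldl (fun (st : List String × List Int × Int) key =>
      let fieldVar := (PySem.Dict.ofList (d.getD key [])).getD "VARS" none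
      match fieldVar with
      | none => st
      | some fv =>
        (st.1 ++ fv, (if fv.length > 1 then st.2.1 ++ [st.2.2] else st.2.1), st.2.2 + (fv.length : Int))
    ) (([], [], 0) : List String × List Int × Int)
  (st.1, st.2.1 ++ [st.2.2])

-- ===== PORT B =====
-- flatten pass + offset table (offsets[-1] appends) + zip selection, mirroring Source B
def GetCrits_alt (inDict : List (String × List (String × Option (List String)))) : List String × List Int :=
  let d := PySem.Dict.ofList inDict
  let lists := d.values.filterMap (fun v => (PySem.Dict.ofList v).getD "VARS" none)
  let masterList := lists.flatten
  let offsets := lists.foldl (fun acc l => acc ++ [PySem.List.pyGetD acc (-1) 0 + (l.length : Int)]) [(0 : Int)]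
  let indices := (offsets.zip lists).foldl (fun acc p => if p.2.length > 1 then acc ++ [p.1] else acc) ([] : List Int)
  (masterList, indices ++ [PySem.List.pyGetD offsets (-1) 0])

-- ===== PRECONDITION & SPEC =====
-- Pre_ excludes exactly the inputs where Python A raises KeyError: some live inner dict lacks the key 'VARS'.
def Pre_GetCrits (inDict : List (String × List (String × Option (List String)))) : Prop :=
  ∀ p ∈ (PySem.Dict.ofList inDict).items, p.2.any (fun q => q.1 == "VARS") = true
instance (inDict : List (String × List (String × Option (List String)))) : Decidable (Pre_GetCrits inDict) := by unfold Pre_GetCrits; infer_instance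
def pvWitness_GetCrits : (List (String × List (String × Option (List String)))) :=
  [("a", [("VARS", some ["x", "y"])]), ("b", [("VARS", none)])]

def Spec_GetCrits (inDict : List (String × List (String × Option (List String)))) (out : List String × List Int) : Prop := out = GetCrits_alt inDict
instance (inDict : List (String × List (String × Option (List String)))) (out : List String × List Int) : Decidable (Spec_GetCrits inDict out) := by unfold Spec_GetCrits; infer_instance

-- ===== CLAIM (what is proved, stated in full; the proofs are below) =====
def Claim_equal_GetCrits : Prop := ∀ (inDict : List (String × List (String × Option (List String)))), Dom_GetCrits inDict → Pre_GetCrits inDict → Spec_GetCrits inDict (GetCrits inDict)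

-- ===== LEMMAS AND PROOFS =====

-- the non-None VARS lists determine everything; these three describe both programs' outputs
def pvTot : List (List String) → Int
  | [] => 0
  | l :: ls => (l.length : Int) + pvTot ls

def pvIndFrom (loc : Int) : List (List String) → List Int
  | [] => []
  | l :: ls => if l.length > 1 then loc :: pvIndFrom (loc + (l.length : Int)) ls
               else pvIndFrom (loc + (l.length : Int)) ls

def pvOffs (c : Int) : List (List String) → List Int
  | [] => [c]
  | l :: ls => c :: pvOffs (c + (l.length : Int)) ls

lemma foldA_spec {β : Type} (g : β → Option (List String)) (xs : List β) :
    ∀ (ms : List String) (is : List Int) (loc : Int),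
    xs.foldl (fun (st : List String × List Int × Int) x =>
        match g x with
        | none => st
        | some fv =>
          (st.1 ++ fv, (if fv.length > 1 then st.2.1 ++ [st.2.2] else st.2.1), st.2.2 + (fv.length : Int)))
      (ms, is, loc)
    = (ms ++ (xs.filterMap g).flatten, is ++ pvIndFrom loc (xs.filterMap g),
       loc + pvTot (xs.filterMap g)) := by
  induction xs with
  | nil => intro ms is loc; simp [pvIndFrom, pvTot]
  | cons x xs ih =>
    intro ms is loc
    cases hx : g x with
    | none => simp [List.foldl_cons, hx, ih]
    | some fv =>
      simp only [List.foldl_cons, hx, List.filterMap_cons, ih, List.flatten_cons]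
      by_cases h : fv.length > 1 <;>
        simp [h, pvIndFrom, pvTot, List.append_assoc, add_assoc]

lemma offs_spec (ls : List (List String)) :
    ∀ (pre : List Int) (c : Int),
    ls.foldl (fun acc l => acc ++ [PySem.List.pyGetD acc (-1) 0 + (l.length : Int)]) (pre ++ [c])
    = pre ++ pvOffs c ls := by
  induction ls with
  | nil => intro pre c; simp [pvOffs]
  | cons l ls ih =>
    intro pre c
    have h1 : PySem.List.pyGetD (pre ++ [c]) (-1) (0 : Int) = c :=
      PySem.List.pyGetD_neg_one_append_singleton pre c 0
    simp only [List.foldl_cons, h1]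
    have : (pre ++ [c]) ++ [c + (l.length : Int)] = (pre ++ [c]) ++ [c + (l.length : Int)] := rfl
    rw [show ((pre ++ [c]) ++ [c + (l.length : Int)]) = ((pre ++ [c]) ++ [c + (l.length : Int)]) from rfl,
        ih (pre ++ [c]) (c + (l.length : Int))]
    simp [pvOffs]

lemma pvOffs_ne_nil (c : Int) (ls : List (List String)) : pvOffs c ls ≠ [] := by
  cases ls <;> simp [pvOffs]

lemma getLast_pvOffs (ls : List (List String)) : ∀ (c : Int) (h : pvOffs c ls ≠ []),
    (pvOffs c ls).getLast h = c + pvTot ls := by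
  induction ls with
  | nil => intro c h; simp [pvOffs, pvTot]
  | cons l ls ih =>
    intro c h
    have hne : pvOffs (c + (l.length : Int)) ls ≠ [] := pvOffs_ne_nil _ _
    show (c :: pvOffs (c + (l.length : Int)) ls).getLast (by simp) = _
    rw [List.getLast_cons hne, ih _ hne]
    simp [pvTot]; ring

lemma last_pvOffs (ls : List (List String)) (c : Int) :
    PySem.List.pyGetD (pvOffs c ls) (-1) 0 = c + pvTot ls := by
  rw [PySem.List.pyGetD_neg_one (h := pvOffs_ne_nil c ls), getLast_pvOffs]

lemma zip_spec (ls : List (List String)) : ∀ (c : Int) (acc : List Int),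
    ((pvOffs c ls).zip ls).foldl (fun acc p => if p.2.length > 1 then acc ++ [p.1] else acc) acc
    = acc ++ pvIndFrom c ls := by
  induction ls with
  | nil => intro c acc; simp [pvOffs, pvIndFrom]
  | cons l ls ih =>
    intro c acc
    rw [show pvOffs c (l :: ls) = c :: pvOffs (c + (l.length : Int)) ls from rfl]
    simp only [List.zip_cons_cons, List.foldl_cons]
    by_cases h : l.length > 1 <;> simp [h, pvIndFrom, ih]

lemma both_spec {β : Type} (g : β → Option (List String)) (xs : List β) :
    (let st := xs.foldl (fun (st : List String × List Int × Int) x =>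
        match g x with
        | none => st
        | some fv =>
          (st.1 ++ fv, (if fv.length > 1 then st.2.1 ++ [st.2.2] else st.2.1), st.2.2 + (fv.length : Int)))
      (([], [], 0) : List String × List Int × Int)
     (st.1, st.2.1 ++ [st.2.2]))
    = (let lists := xs.filterMap g
       let masterList := lists.flatten
       let offsets := lists.foldl (fun acc l => acc ++ [PySem.List.pyGetD acc (-1) 0 + (l.length : Int)]) [(0 : Int)]
       let indices := (offsets.zip lists).foldl (fun acc p => if p.2.length > 1 then acc ++ [p.1] else acc) ([] : List Int)
       (masterList, indices ++ [PySem.List.pyGetD offsets (-1) 0])) := by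
  simp only
  rw [foldA_spec]
  rw [show [(0 : Int)] = ([] : List Int) ++ [0] from rfl, offs_spec]
  simp only [List.nil_append]
  rw [zip_spec, last_pvOffs]
  simp only [List.nil_append]

-- ===== VERDICT (by name: the statement is the Claim_ definition above) =====
theorem GetCrits_spec : Claim_equal_GetCrits := by
  intro inDict _ _
  show GetCrits inDict = GetCrits_alt inDict
  simp only [GetCrits, GetCrits_alt]
  rw [PySem.Dict.values_eq_map_keys (PySem.Dict.ofList inDict) (PySem.Dict.nodup_keys_ofList inDict) []]
  rw [List.filterMap_map]
  simp only [Function.comp_def]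
  exact both_spec (fun key => (PySem.Dict.ofList ((PySem.Dict.ofList inDict).getD key [])).getD "VARS" none)
    (PySem.Dict.ofList inDict).keys
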